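-- pv_equiv track=rewrite | github.com/akshay1892/PyJHora | src/jhora/horoscope/dhasa/graha/chathuraaseethi_sama.py | _antardhasa
-- ===== SOURCE A (Python) =====
-- dhasa_adhipathi_list = {k:12 for k in range(7)} # duration 12 years Total 84 years
--
-- def _next_adhipati(lord,dirn=1):
--     """Returns next lord after `lord` in the adhipati_list"""
--     current = list(dhasa_adhipathi_list.keys()).index(lord)
--     next_lord = list(dhasa_adhipathi_list.keys())[((current + dirn) % len(dhasa_adhipathi_list))]
--     return next_lord
--
-- def _antardhasa(lord,antardhasa_option=1):
--     if antardhasa_option in [3,4]: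
--         lord = _next_adhipati(lord, dirn=1)
--     elif antardhasa_option in [5,6]:
--         lord = _next_adhipati(lord, dirn=-1)
--     dirn = 1 if antardhasa_option in [1,3,5] else -1
--     _bhukthis = []
--     for _ in range(len(dhasa_adhipathi_list)):
--         _bhukthis.append(lord)
--         lord = _next_adhipati(lord,dirn)
--     return _bhukthis
-- ===== SOURCE B (Python) =====
-- def _antardhasa(lord, antardhasa_option=1):
--     keys = list(range(7))
--     p = keys.index(lord)  # ValueError for lords outside the 7 keys, like A
--     if antardhasa_option in (3, 4):
--         p = (p + 1) % 7
--     elif antardhasa_option in (5, 6):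
--         p = (p - 1) % 7
--     if antardhasa_option in (1, 3, 5):
--         cyc = keys
--     else:
--         cyc = keys[::-1]
--         p = 6 - p
--     return cyc[p:] + cyc[:p]
-- ===== Notes on version B (the rewrite author's own statement) =====
-- stated objective: alternative
-- what changed: Replaces the per-step accumulator loop that repeatedly calls _next_adhipati (each call re-scanning the key list with .index) by a single list rotation: pick the forward or reversed key cycle once, locate the start position, and return cyc[p:]+cyc[:p] built by two slices.
-- outside the precondition, e.g. on _antardhasa(7, 1): A raises ValueError, B raises ValueError
import Mathlib
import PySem

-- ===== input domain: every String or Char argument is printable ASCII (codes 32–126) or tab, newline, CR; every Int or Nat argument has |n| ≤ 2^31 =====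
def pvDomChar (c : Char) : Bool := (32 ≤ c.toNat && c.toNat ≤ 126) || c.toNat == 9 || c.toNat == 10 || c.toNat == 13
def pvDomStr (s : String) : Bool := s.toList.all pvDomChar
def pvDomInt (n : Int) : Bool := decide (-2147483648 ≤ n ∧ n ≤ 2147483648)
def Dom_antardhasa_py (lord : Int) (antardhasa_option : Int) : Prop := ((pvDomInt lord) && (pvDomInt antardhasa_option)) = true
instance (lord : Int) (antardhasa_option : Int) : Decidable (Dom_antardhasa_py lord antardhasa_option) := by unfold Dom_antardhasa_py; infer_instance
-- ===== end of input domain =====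

-- B replaces A's per-step accumulator loop (repeated _next_adhipati / list.index calls)
-- with one rotation of the (possibly reversed) key cycle built from two slices: alternative decomposition.


-- ===== PORT A =====
-- keys of dhasa_adhipathi_list = {k:12 for k in range(7)}
def pvKeysA : List Int := [0, 1, 2, 3, 4, 5, 6]

-- _next_adhipati; `.index` raising ValueError (lord not a key) is excluded by Pre_, `.getD 0` is never reached under Pre_
def pvNextAdhipati (lord : Int) (dirn : Int) : Int :=
  let current : Int := ((PySem.List.index? pvKeysA lord).getD 0 : Nat)
  (PySem.List.pyGet? pvKeysA (PySem.Int.mod (current + dirn) 7)).getD 0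

def antardhasa_py (lord : Int) (antardhasa_option : Int) : List Int :=
  let lord1 : Int :=
    if antardhasa_option = 3 ∨ antardhasa_option = 4 then pvNextAdhipati lord 1
    else if antardhasa_option = 5 ∨ antardhasa_option = 6 then pvNextAdhipati lord (-1)
    else lord
  let dirn : Int := if antardhasa_option = 1 ∨ antardhasa_option = 3 ∨ antardhasa_option = 5 then 1 else -1
  let s := (PySem.List.pyRange 0 7 1).foldl
    (fun (st : List Int × Int) _ => (st.1 ++ [st.2], pvNextAdhipati st.2 dirn)) ([], lord1)
  s.1

-- ===== PORT B =====
-- Source B's ValueError (keys.index for lord outside range(7)) is excluded by Pre_; `.getD` never reached under Pre_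
def antardhasa_py_alt (lord : Int) (antardhasa_option : Int) : List Int :=
  let keys : List Int := [0, 1, 2, 3, 4, 5, 6]
  let p0 : Int := ((PySem.List.index? keys lord).getD 0 : Nat)
  let p1 : Int :=
    if antardhasa_option = 3 ∨ antardhasa_option = 4 then PySem.Int.mod (p0 + 1) 7
    else if antardhasa_option = 5 ∨ antardhasa_option = 6 then PySem.Int.mod (p0 - 1) 7
    else p0
  let cp : List Int × Int :=
    if antardhasa_option = 1 ∨ antardhasa_option = 3 ∨ antardhasa_option = 5 then (keys, p1)
    else (((PySem.List.slice? keys none none (-1)).getD []), 6 - p1)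
  PySem.List.slice cp.1 (some cp.2) none ++ PySem.List.slice cp.1 none (some cp.2)

-- ===== PRECONDITION & SPEC =====
-- Pre_ excludes exactly the lords outside the 7 dict keys, where A's list.index raises ValueError (B raises too)
def Pre_antardhasa_py (lord : Int) (antardhasa_option : Int) : Prop := 0 ≤ lord ∧ lord < 7
instance (lord : Int) (antardhasa_option : Int) : Decidable (Pre_antardhasa_py lord antardhasa_option) := by unfold Pre_antardhasa_py; infer_instance
def pvWitness_antardhasa_py : Int × Int := (2, 5)
def Spec_antardhasa_py (lord : Int) (antardhasa_option : Int) (out : List Int) : Prop := out = antardhasa_py_alt lord antardhasa_option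
instance (lord : Int) (antardhasa_option : Int) (out : List Int) : Decidable (Spec_antardhasa_py lord antardhasa_option out) := by unfold Spec_antardhasa_py; infer_instance

-- ===== CLAIM =====
def Claim_equal_antardhasa_py : Prop := ∀ (lord : Int) (antardhasa_option : Int), Dom_antardhasa_py lord antardhasa_option → Pre_antardhasa_py lord antardhasa_option → Spec_antardhasa_py lord antardhasa_option (antardhasa_py lord antardhasa_option)

-- ===== LEMMAS AND PROOFS =====

-- ===== VERDICT =====
theorem antardhasa_py_spec : Claim_equal_antardhasa_py := by
  intro lord opt _ hpre
  unfold Spec_antardhasa_py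
  obtain ⟨h0, h7⟩ := hpre
  have hl : lord = 0 ∨ lord = 1 ∨ lord = 2 ∨ lord = 3 ∨ lord = 4 ∨ lord = 5 ∨ lord = 6 := by omega
  unfold antardhasa_py antardhasa_py_alt
  by_cases h34 : opt = 3 ∨ opt = 4 <;>
    by_cases h56 : opt = 5 ∨ opt = 6 <;>
    by_cases h135 : opt = 1 ∨ opt = 3 ∨ opt = 5 <;>
    simp only [h34, h56, h135, if_pos, if_neg] <;>
    rcases hl with h | h | h | h | h | h | h <;> subst h <;>
    first | (exfalso; omega) | decide
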